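-- pv_equiv track=rewrite | github.com/uchakhuberishvili/GOA-Projects- | day 068/classwork/lesson68.py | stone_scoring
-- ===== SOURCE A (Python) =====
-- def stone_scoring(board):
--     rows = len(board)
--     cols = len(board[0])
--     def in_bounds(x, y):
--         return 0 <= x < rows and 0 <= y < cols
--     def dfs(x, y, color):
--         stack = [(x, y)]
--         group = set()
--         liberties = set()
--         while stack:
--             cx, cy = stack.pop()
--             if (cx, cy) in group:
--                 continue
--             group.add((cx, cy))
--             for dx, dy in [(-1, 0), (1, 0), (0, -1), (0, 1)]:
--                 nx, ny = cx + dx, cy + dy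
--                 if in_bounds(nx, ny):
--                     if board[nx][ny] == color:
--                         if (nx, ny) not in group:
--                             stack.append((nx, ny))
--                     elif board[nx][ny] == "W" or board[nx][ny] == "B":
--                         liberties.add((nx, ny))
--         return group, liberties
--     visited = set()
--     scores = {"B": 0, "W": 0}
--     for r in range(rows):
--         for c in range(cols):
--             if board[r][c] in "BW" and (r, c) not in visited:
--                 color = board[r][c]
--                 group, liberties = dfs(r, c, color)
--                 visited.update(group)
--                 scores[color] += len(group) + len(liberties)
--
--     if scores["B"] > scores["W"]:
--         return "B"
--     elif scores["W"] > scores["B"]: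
--         return "W"
--     else:
--         return "Draw"
-- ===== SOURCE B (Python) =====
-- def stone_scoring(board):
--     rows = len(board)
--     cols = len(board[0])
--
--     def in_bounds(x, y):
--         return 0 <= x < rows and 0 <= y < cols
--
--     def neighbors(x, y):
--         return [(x - 1, y), (x + 1, y), (x, y - 1), (x, y + 1)]
--
--     def component(r, c, color):
--         # naive fixpoint saturation: repeatedly absorb same-colored
--         # in-bounds neighbors of the whole set until it stops growing
--         comp = {(r, c)}
--         while True:
--             grown = set(comp)
--             for (x, y) in comp:
--                 for (nx, ny) in neighbors(x, y):
--                     if in_bounds(nx, ny) and board[nx][ny] == color: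
--                         grown.add((nx, ny))
--             if len(grown) == len(comp):
--                 return comp
--             comp = grown
--
--     visited = set()
--     black = 0
--     white = 0
--     for r in range(rows):
--         for c in range(cols):
--             cell = board[r][c]
--             if (cell == "B" or cell == "W") and (r, c) not in visited:
--                 comp = component(r, c, cell)
--                 visited |= comp
--                 libs = set()
--                 for (x, y) in comp:
--                     for (nx, ny) in neighbors(x, y):
--                         if in_bounds(nx, ny) and board[nx][ny] != cell \
--                                 and (board[nx][ny] == "B" or board[nx][ny] == "W"):
--                             libs.add((nx, ny))
--                 pts = len(comp) + len(libs)
--                 if cell == "B":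
--                     black += pts
--                 else:
--                     white += pts
--     if black > white:
--         return "B"
--     if white > black:
--         return "W"
--     return "Draw"
-- ===== Notes on version B (the rewrite author's own statement) =====
-- stated objective: alternative
-- what changed: Replaces the explicit-stack DFS per group (with liberties collected during the traversal) by a whole-set fixpoint saturation that repeatedly absorbs same-colored neighbors of the entire component until it stops growing, with liberties computed in a separate pass over the finished component, and tracks the two scores as plain integers instead of a dict.
import Mathlib
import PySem

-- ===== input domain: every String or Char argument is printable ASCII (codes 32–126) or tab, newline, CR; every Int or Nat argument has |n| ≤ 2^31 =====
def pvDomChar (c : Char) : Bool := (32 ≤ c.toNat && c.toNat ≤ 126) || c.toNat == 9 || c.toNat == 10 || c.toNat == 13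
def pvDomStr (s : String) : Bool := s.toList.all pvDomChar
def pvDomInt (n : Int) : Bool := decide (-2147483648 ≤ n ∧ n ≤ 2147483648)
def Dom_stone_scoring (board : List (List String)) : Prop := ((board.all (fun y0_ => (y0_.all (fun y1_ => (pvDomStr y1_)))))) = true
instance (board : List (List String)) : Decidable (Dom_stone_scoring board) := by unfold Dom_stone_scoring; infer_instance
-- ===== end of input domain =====

-- B replaces A's explicit-stack DFS per group by whole-set fixpoint saturation with a separate
-- liberty pass and two integer score accumulators (objective: alternative, not faster).


-- ===== PORT A =====
-- shared board accessors (both Pythons index the board the same way)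
def pvInB (rows cols x y : Int) : Bool := decide (0 ≤ x ∧ x < rows ∧ 0 ≤ y ∧ y < cols)

-- board[x][y]; total with default "" — inside Pre_ every guarded access is in range, so this is exact
def pvCell (board : List (List String)) (x y : Int) : String :=
  ((PySem.List.pyGet? board x).bind (fun row => PySem.List.pyGet? row y)).getD ""

def pvDeltas : List (Int × Int) := [(-1, 0), (1, 0), (0, -1), (0, 1)]

-- body of the `for dx, dy in [...]` loop inside A's dfs
def pvScanA (board : List (List String)) (rows cols : Int) (color : String)
    (group' : PySem.Set (Int × Int)) (c : Int × Int)
    (acc : List (Int × Int) × PySem.Set (Int × Int)) (d : Int × Int) :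
    List (Int × Int) × PySem.Set (Int × Int) :=
  let n : Int × Int := (c.1 + d.1, c.2 + d.2)
  if pvInB rows cols n.1 n.2 then
    if pvCell board n.1 n.2 == color then
      if n ∈ group' then acc else (n :: acc.1, acc.2)
    else if pvCell board n.1 n.2 == "W" || pvCell board n.1 n.2 == "B" then
      (acc.1, PySem.Set.add acc.2 n)
    else acc
  else acc

-- the while-stack loop of A's dfs; one fuel unit per pop (4*cells+2 fuel always suffices, proved below)
def pvDfsA (board : List (List String)) (rows cols : Int) (color : String) :
    Nat → List (Int × Int) → PySem.Set (Int × Int) → PySem.Set (Int × Int) →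
    PySem.Set (Int × Int) × PySem.Set (Int × Int)
  | 0, _, group, lib => (group, lib)
  | _ + 1, [], group, lib => (group, lib)
  | fuel + 1, c :: stack, group, lib =>
    if c ∈ group then pvDfsA board rows cols color fuel stack group lib
    else
      let group' := PySem.Set.add group c
      let sl := pvDeltas.foldl (pvScanA board rows cols color group' c) (stack, lib)
      pvDfsA board rows cols color fuel sl.1 group' sl.2

-- body of the `for c in range(cols)` loop of A
def pvCellStepA (board : List (List String)) (rows cols : Int) (fuel : Nat) (r : Int)
    (st : PySem.Set (Int × Int) × PySem.Dict String Int) (c : Int) :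
    PySem.Set (Int × Int) × PySem.Dict String Int :=
  if PySem.Str.isIn (pvCell board r c) "BW" && !(PySem.Set.contains st.1 (r, c)) then
    let color := pvCell board r c
    let gl := pvDfsA board rows cols color fuel [(r, c)] PySem.Set.empty PySem.Set.empty
    (PySem.Set.update st.1 gl.1,
     st.2.insert color (st.2.getD color 0 + (PySem.List.len gl.1 + PySem.List.len gl.2)))
  else st

def stone_scoring (board : List (List String)) : String :=
  let rows : Int := PySem.List.len board
  let cols : Int := PySem.List.len (board.headD [])
  let fuel : Nat := 4 * (board.length * (board.headD []).length) + 2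
  let fin := (PySem.List.pyRange 0 rows 1).foldl (fun st r =>
      (PySem.List.pyRange 0 cols 1).foldl (pvCellStepA board rows cols fuel r) st)
      ((PySem.Set.empty : PySem.Set (Int × Int)),
       (PySem.Dict.ofList [("B", 0), ("W", 0)] : PySem.Dict String Int))
  if fin.2.getD "B" 0 > fin.2.getD "W" 0 then "B"
  else if fin.2.getD "W" 0 > fin.2.getD "B" 0 then "W"
  else "Draw"

-- ===== PORT B =====
def pvNbrsOf (p : Int × Int) : List (Int × Int) :=
  [(p.1 - 1, p.2), (p.1 + 1, p.2), (p.1, p.2 - 1), (p.1, p.2 + 1)]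

-- body of the neighbor loop inside B's growth pass
def pvGrowStep (board : List (List String)) (rows cols : Int) (color : String)
    (grown : PySem.Set (Int × Int)) (n : Int × Int) : PySem.Set (Int × Int) :=
  if pvInB rows cols n.1 n.2 && (pvCell board n.1 n.2 == color) then
    PySem.Set.add grown n
  else grown

def pvGrow (board : List (List String)) (rows cols : Int) (color : String)
    (comp : PySem.Set (Int × Int)) : PySem.Set (Int × Int) :=
  comp.foldl (fun grown p => (pvNbrsOf p).foldl (pvGrowStep board rows cols color) grown)
    (PySem.Set.ofList comp)

-- the saturation loop of B's component; fuel cells+1 always suffices (proved below)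
def pvComponent (board : List (List String)) (rows cols : Int) (color : String) :
    Nat → PySem.Set (Int × Int) → PySem.Set (Int × Int)
  | 0, comp => comp
  | fuel + 1, comp =>
    let grown := pvGrow board rows cols color comp
    if PySem.Set.len grown == PySem.Set.len comp then comp
    else pvComponent board rows cols color fuel grown

-- body of the neighbor loop inside B's liberty pass
def pvLibStep (board : List (List String)) (rows cols : Int) (cell : String)
    (libs : PySem.Set (Int × Int)) (n : Int × Int) : PySem.Set (Int × Int) :=
  if pvInB rows cols n.1 n.2 && !(pvCell board n.1 n.2 == cell) &&
     (pvCell board n.1 n.2 == "B" || pvCell board n.1 n.2 == "W") then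
    PySem.Set.add libs n
  else libs

def pvLibsB (board : List (List String)) (rows cols : Int) (cell : String)
    (comp : PySem.Set (Int × Int)) : PySem.Set (Int × Int) :=
  comp.foldl (fun libs p => (pvNbrsOf p).foldl (pvLibStep board rows cols cell) libs)
    PySem.Set.empty

-- body of the `for c in range(cols)` loop of B
def pvCellStepB (board : List (List String)) (rows cols : Int) (fuel : Nat) (r : Int)
    (st : PySem.Set (Int × Int) × (Int × Int)) (c : Int) :
    PySem.Set (Int × Int) × (Int × Int) :=
  let cell := pvCell board r c
  if (cell == "B" || cell == "W") && !(PySem.Set.contains st.1 (r, c)) then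
    let comp := pvComponent board rows cols cell fuel (PySem.Set.add PySem.Set.empty (r, c))
    let libs := pvLibsB board rows cols cell comp
    let pts := PySem.List.len comp + PySem.List.len libs
    (PySem.Set.update st.1 comp,
     if cell == "B" then (st.2.1 + pts, st.2.2) else (st.2.1, st.2.2 + pts))
  else st

def stone_scoring_alt (board : List (List String)) : String :=
  let rows : Int := PySem.List.len board
  let cols : Int := PySem.List.len (board.headD [])
  let fuel : Nat := board.length * (board.headD []).length + 1
  let fin := (PySem.List.pyRange 0 rows 1).foldl (fun st r =>
      (PySem.List.pyRange 0 cols 1).foldl (pvCellStepB board rows cols fuel r) st)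
      ((PySem.Set.empty : PySem.Set (Int × Int)), ((0 : Int), (0 : Int)))
  if fin.2.1 > fin.2.2 then "B"
  else if fin.2.2 > fin.2.1 then "W"
  else "Draw"

-- ===== PRECONDITION & SPEC =====
-- Pre_ excludes exactly the inputs where A raises: the empty board (IndexError on board[0]),
-- a row shorter than row 0 (IndexError), and a scanned cell equal to "" or "BW" (these pass
-- Python's substring test `board[r][c] in "BW"` and then raise KeyError at scores[color]).
def Pre_stone_scoring (board : List (List String)) : Prop :=
  board ≠ [] ∧ ∀ row ∈ board, (board.headD []).length ≤ row.length ∧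
    ∀ s ∈ row.take (board.headD []).length, s ≠ "" ∧ s ≠ "BW"

instance (board : List (List String)) : Decidable (Pre_stone_scoring board) := by
  unfold Pre_stone_scoring; infer_instance

def pvWitness_stone_scoring : List (List String) := [["B", "W"], [".", "B"]]

def Spec_stone_scoring (board : List (List String)) (out : String) : Prop := out = stone_scoring_alt board
instance (board : List (List String)) (out : String) : Decidable (Spec_stone_scoring board out) := by unfold Spec_stone_scoring; infer_instance

-- ===== CLAIM (what is proved, stated in full; the proofs are below) =====
def Claim_equal_stone_scoring : Prop := ∀ (board : List (List String)), Dom_stone_scoring board → Pre_stone_scoring board → Spec_stone_scoring board (stone_scoring board)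

-- ===== LEMMAS AND PROOFS =====

-- ---- graph-side vocabulary (proof helpers only) ----
def pvGood (rows cols : Int) (p : Int × Int) : Prop :=
  0 ≤ p.1 ∧ p.1 < rows ∧ 0 ≤ p.2 ∧ p.2 < cols

def pvStep (board : List (List String)) (rows cols : Int) (color : String)
    (p q : Int × Int) : Prop :=
  q ∈ pvNbrsOf p ∧ pvGood rows cols q ∧ pvCell board q.1 q.2 = color

def pvReach (board : List (List String)) (rows cols : Int) (color : String) :
    (Int × Int) → (Int × Int) → Prop :=
  Relation.ReflTransGen (pvStep board rows cols color)

def pvLibCond (board : List (List String)) (rows cols : Int) (color : String)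
    (q : Int × Int) : Prop :=
  pvGood rows cols q ∧ pvCell board q.1 q.2 ≠ color ∧
    (pvCell board q.1 q.2 = "W" ∨ pvCell board q.1 q.2 = "B")

def pvLibOf (board : List (List String)) (rows cols : Int) (color : String)
    (g : List (Int × Int)) (q : Int × Int) : Prop :=
  pvLibCond board rows cols color q ∧ ∃ p ∈ g, q ∈ pvNbrsOf p

lemma pvInB_iff (rows cols x y : Int) :
    pvInB rows cols x y = true ↔ (0 ≤ x ∧ x < rows ∧ 0 ≤ y ∧ y < cols) := by
  simp [pvInB]

lemma pvNbrs_map (c : Int × Int) :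
    pvDeltas.map (fun d => (c.1 + d.1, c.2 + d.2)) = pvNbrsOf c := by
  simp [pvDeltas, pvNbrsOf, Prod.ext_iff]
  omega

lemma mem_pvNbrsOf_iff (c q : Int × Int) :
    q ∈ pvNbrsOf c ↔ ∃ d ∈ pvDeltas, q = (c.1 + d.1, c.2 + d.2) := by
  rw [← pvNbrs_map]
  simp [eq_comm]

-- ---- the cell-counting measure for A's fuel ----
def pvAllCellsProp (rows cols : Int) : Set (Int × Int) := {p | pvGood rows cols p}

def pvAllCells (rows cols : Int) : Finset (Nat × Nat) :=
  Finset.range rows.toNat ×ˢ Finset.range cols.toNat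

lemma mem_pvAllCells (rows cols : Int) (p : Nat × Nat) :
    p ∈ pvAllCells rows cols ↔ ((p.1 : Int), (p.2 : Int)) ∈ pvAllCellsProp rows cols := by
  simp only [pvAllCells, Finset.mem_product, Finset.mem_range, pvAllCellsProp, Set.mem_setOf_eq,
    pvGood]
  omega

def pvFree (rows cols : Int) (g : List (Int × Int)) : Nat :=
  ((pvAllCells rows cols).filter (fun p => ((p.1 : Int), (p.2 : Int)) ∉ g)).card

lemma pvFree_empty (rows cols : Int) :
    pvFree rows cols [] = rows.toNat * cols.toNat := by
  simp [pvFree, pvAllCells]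

lemma pvFree_add_lt (rows cols : Int) (g : List (Int × Int)) (c : Int × Int)
    (hg : pvGood rows cols c) (hc : c ∉ g) :
    pvFree rows cols (PySem.Set.add g c) < pvFree rows cols g := by
  apply Finset.card_lt_card
  have hsub : (pvAllCells rows cols).filter (fun p => ((p.1 : Int), (p.2 : Int)) ∉ PySem.Set.add g c) ⊆
      (pvAllCells rows cols).filter (fun p => ((p.1 : Int), (p.2 : Int)) ∉ g) := by
    intro p hp
    rw [Finset.mem_filter] at hp ⊢
    exact ⟨hp.1, fun hm => hp.2 ((PySem.Set.mem_add _ _ _).mpr (Or.inl hm))⟩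
  rw [Finset.ssubset_iff_of_subset hsub]
  refine ⟨(c.1.toNat, c.2.toNat), ?_, ?_⟩
  · rw [Finset.mem_filter]
    obtain ⟨h1, h2, h3, h4⟩ := hg
    constructor
    · rw [mem_pvAllCells]
      simp only [pvAllCellsProp, Set.mem_setOf_eq, pvGood]
      constructor
      · omega
      · refine ⟨by omega, by omega, by omega⟩
    · have : ((c.1.toNat : Int), (c.2.toNat : Int)) = c := by
        obtain ⟨x, y⟩ := c
        simp only [Prod.mk.injEq]
        constructor <;> omega
      rw [this]; exact hc
  · rw [Finset.mem_filter]
    intro hcon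
    obtain ⟨h1, h2, h3, h4⟩ := hg
    have : ((c.1.toNat : Int), (c.2.toNat : Int)) = c := by
      obtain ⟨x, y⟩ := c
      simp only [Prod.mk.injEq]
      constructor <;> omega
    rw [this] at hcon
    exact hcon.2 ((PySem.Set.mem_add _ _ _).mpr (Or.inr rfl))

-- ---- characterization of the neighbor scan inside A's dfs ----
lemma pvScanA_fold (board : List (List String)) (rows cols : Int) (color : String)
    (g' : PySem.Set (Int × Int)) (c : Int × Int) :
    ∀ (ds : List (Int × Int)) (st : List (Int × Int)) (l : PySem.Set (Int × Int)),
    (∀ p, p ∈ (ds.foldl (pvScanA board rows cols color g' c) (st, l)).1 ↔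
        p ∈ st ∨ ∃ d ∈ ds, p = (c.1 + d.1, c.2 + d.2) ∧ pvGood rows cols p ∧
          pvCell board p.1 p.2 = color ∧ p ∉ g') ∧
    (∀ q, q ∈ (ds.foldl (pvScanA board rows cols color g' c) (st, l)).2 ↔
        q ∈ l ∨ ∃ d ∈ ds, q = (c.1 + d.1, c.2 + d.2) ∧ pvLibCond board rows cols color q) ∧
    (ds.foldl (pvScanA board rows cols color g' c) (st, l)).1.length ≤ st.length + ds.length ∧
    (l.Nodup → (ds.foldl (pvScanA board rows cols color g' c) (st, l)).2.Nodup) := by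
  intro ds
  induction ds with
  | nil =>
    intro st l
    refine ⟨by simp, by simp, by simp, fun h => h⟩
  | cons d ds ih =>
    intro st l
    rw [List.foldl_cons]
    by_cases h1 : pvInB rows cols (c.1 + d.1) (c.2 + d.2) = true
    · by_cases h2 : (pvCell board (c.1 + d.1) (c.2 + d.2) == color) = true
      · by_cases h3 : ((c.1 + d.1, c.2 + d.2) : Int × Int) ∈ g'
        · -- same color but already in group: no change
          have hstep : pvScanA board rows cols color g' c (st, l) d = (st, l) := by
            simp only [pvScanA, h1, h2, if_pos]
            simp [h3]
          rw [hstep]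
          obtain ⟨ih1, ih2, ih3, ih4⟩ := ih st l
          rw [beq_iff_eq] at h2
          refine ⟨?_, ?_, by simp only [List.length_cons] at ih3 ⊢; omega, ih4⟩
          · intro p
            rw [ih1 p]
            constructor
            · rintro (hp | ⟨d', hd', h⟩)
              · exact Or.inl hp
              · exact Or.inr ⟨d', List.mem_cons_of_mem _ hd', h⟩
            · rintro (hp | ⟨d', hd', rfl, hg, hcol, hng⟩)
              · exact Or.inl hp
              · rcases List.mem_cons.mp hd' with rfl | hd'
                · exact absurd h3 hng
                · exact Or.inr ⟨d', hd', rfl, hg, hcol, hng⟩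
          · intro q
            rw [ih2 q]
            constructor
            · rintro (hq | ⟨d', hd', h⟩)
              · exact Or.inl hq
              · exact Or.inr ⟨d', List.mem_cons_of_mem _ hd', h⟩
            · rintro (hq | ⟨d', hd', rfl, hlc⟩)
              · exact Or.inl hq
              · rcases List.mem_cons.mp hd' with rfl | hd'
                · exact absurd h2 hlc.2.1
                · exact Or.inr ⟨d', hd', rfl, hlc⟩
        · -- push
          have hstep : pvScanA board rows cols color g' c (st, l) d =
              (((c.1 + d.1, c.2 + d.2) : Int × Int) :: st, l) := by
            simp only [pvScanA, h1, h2, if_pos]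
            simp [h3]
          rw [hstep]
          obtain ⟨ih1, ih2, ih3, ih4⟩ := ih (((c.1 + d.1, c.2 + d.2) : Int × Int) :: st) l
          rw [beq_iff_eq] at h2
          have hgood : pvGood rows cols ((c.1 + d.1, c.2 + d.2) : Int × Int) := by
            rw [pvInB_iff] at h1; exact h1
          refine ⟨?_, ?_, by simp only [List.length_cons] at ih3 ⊢; omega, ih4⟩
          · intro p
            rw [ih1 p]
            constructor
            · rintro (hp | ⟨d', hd', h⟩)
              · rcases List.mem_cons.mp hp with rfl | hp
                · exact Or.inr ⟨d, List.mem_cons_self, rfl, hgood, h2, h3⟩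
                · exact Or.inl hp
              · exact Or.inr ⟨d', List.mem_cons_of_mem _ hd', h⟩
            · rintro (hp | ⟨d', hd', rfl, hg, hcol, hng⟩)
              · exact Or.inl (List.mem_cons_of_mem _ hp)
              · rcases List.mem_cons.mp hd' with rfl | hd'
                · exact Or.inl List.mem_cons_self
                · exact Or.inr ⟨d', hd', rfl, hg, hcol, hng⟩
          · intro q
            rw [ih2 q]
            constructor
            · rintro (hq | ⟨d', hd', h⟩)
              · exact Or.inl hq
              · exact Or.inr ⟨d', List.mem_cons_of_mem _ hd', h⟩
            · rintro (hq | ⟨d', hd', rfl, hlc⟩)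
              · exact Or.inl hq
              · rcases List.mem_cons.mp hd' with rfl | hd'
                · exact absurd h2 hlc.2.1
                · exact Or.inr ⟨d', hd', rfl, hlc⟩
      · by_cases h4 : ((pvCell board (c.1 + d.1) (c.2 + d.2) == "W") ||
            (pvCell board (c.1 + d.1) (c.2 + d.2) == "B")) = true
        · -- liberty
          have hstep : pvScanA board rows cols color g' c (st, l) d =
              (st, PySem.Set.add l ((c.1 + d.1, c.2 + d.2) : Int × Int)) := by
            simp only [pvScanA]
            simp [h1, h2, h4]
          rw [hstep]
          obtain ⟨ih1, ih2, ih3, ih4⟩ :=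
            ih st (PySem.Set.add l ((c.1 + d.1, c.2 + d.2) : Int × Int))
          rw [beq_iff_eq] at h2
          have hgood : pvGood rows cols ((c.1 + d.1, c.2 + d.2) : Int × Int) := by
            rw [pvInB_iff] at h1; exact h1
          have hwb : pvCell board (c.1 + d.1) (c.2 + d.2) = "W" ∨
              pvCell board (c.1 + d.1) (c.2 + d.2) = "B" := by
            rcases Bool.or_eq_true_iff.mp h4 with h | h
            · exact Or.inl (beq_iff_eq.mp h)
            · exact Or.inr (beq_iff_eq.mp h)
          refine ⟨?_, ?_, by simp only [List.length_cons] at ih3 ⊢; omega,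
            fun hnd => ih4 (PySem.Set.nodup_add l _ hnd)⟩
          · intro p
            rw [ih1 p]
            constructor
            · rintro (hp | ⟨d', hd', h⟩)
              · exact Or.inl hp
              · exact Or.inr ⟨d', List.mem_cons_of_mem _ hd', h⟩
            · rintro (hp | ⟨d', hd', rfl, hg, hcol, hng⟩)
              · exact Or.inl hp
              · rcases List.mem_cons.mp hd' with rfl | hd'
                · exact absurd hcol h2
                · exact Or.inr ⟨d', hd', rfl, hg, hcol, hng⟩
          · intro q
            rw [ih2 q]
            constructor
            · rintro (hq | ⟨d', hd', h⟩)
              · rcases (PySem.Set.mem_add _ _ _).mp hq with hq | rfl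
                · exact Or.inl hq
                · exact Or.inr ⟨d, List.mem_cons_self, rfl, hgood, h2, hwb⟩
              · exact Or.inr ⟨d', List.mem_cons_of_mem _ hd', h⟩
            · rintro (hq | ⟨d', hd', rfl, hlc⟩)
              · exact Or.inl ((PySem.Set.mem_add _ _ _).mpr (Or.inl hq))
              · rcases List.mem_cons.mp hd' with rfl | hd'
                · exact Or.inl ((PySem.Set.mem_add _ _ _).mpr (Or.inr rfl))
                · exact Or.inr ⟨d', hd', rfl, hlc⟩
        · -- in bounds, neither same color nor a stone: no change
          have hstep : pvScanA board rows cols color g' c (st, l) d = (st, l) := by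
            simp only [pvScanA]
            simp [h1, h2, h4]
          rw [hstep]
          obtain ⟨ih1, ih2, ih3, ih4⟩ := ih st l
          have hnwb : ¬(pvCell board (c.1 + d.1) (c.2 + d.2) = "W" ∨
              pvCell board (c.1 + d.1) (c.2 + d.2) = "B") := by
            intro hcon
            apply h4
            rcases hcon with h | h
            · exact Bool.or_eq_true_iff.mpr (Or.inl (beq_iff_eq.mpr h))
            · exact Bool.or_eq_true_iff.mpr (Or.inr (beq_iff_eq.mpr h))
          refine ⟨?_, ?_, by simp only [List.length_cons] at ih3 ⊢; omega, ih4⟩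
          · intro p
            rw [ih1 p]
            constructor
            · rintro (hp | ⟨d', hd', h⟩)
              · exact Or.inl hp
              · exact Or.inr ⟨d', List.mem_cons_of_mem _ hd', h⟩
            · rintro (hp | ⟨d', hd', rfl, hg, hcol, hng⟩)
              · exact Or.inl hp
              · rcases List.mem_cons.mp hd' with rfl | hd'
                · exact absurd (beq_iff_eq.mpr hcol) h2
                · exact Or.inr ⟨d', hd', rfl, hg, hcol, hng⟩
          · intro q
            rw [ih2 q]
            constructor
            · rintro (hq | ⟨d', hd', h⟩)
              · exact Or.inl hq
              · exact Or.inr ⟨d', List.mem_cons_of_mem _ hd', h⟩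
            · rintro (hq | ⟨d', hd', rfl, hlc⟩)
              · exact Or.inl hq
              · rcases List.mem_cons.mp hd' with rfl | hd'
                · exact absurd hlc.2.2 hnwb
                · exact Or.inr ⟨d', hd', rfl, hlc⟩
    · -- out of bounds: no change
      have hstep : pvScanA board rows cols color g' c (st, l) d = (st, l) := by
        simp only [pvScanA]
        simp [h1]
      rw [hstep]
      obtain ⟨ih1, ih2, ih3, ih4⟩ := ih st l
      have hng : ¬ pvGood rows cols ((c.1 + d.1, c.2 + d.2) : Int × Int) := by
        intro hg
        apply h1
        rw [pvInB_iff]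
        exact hg
      refine ⟨?_, ?_, by simp only [List.length_cons] at ih3 ⊢; omega, ih4⟩
      · intro p
        rw [ih1 p]
        constructor
        · rintro (hp | ⟨d', hd', h⟩)
          · exact Or.inl hp
          · exact Or.inr ⟨d', List.mem_cons_of_mem _ hd', h⟩
        · rintro (hp | ⟨d', hd', rfl, hg, hcol, hngg⟩)
          · exact Or.inl hp
          · rcases List.mem_cons.mp hd' with rfl | hd'
            · exact absurd hg hng
            · exact Or.inr ⟨d', hd', rfl, hg, hcol, hngg⟩
      · intro q
        rw [ih2 q]
        constructor
        · rintro (hq | ⟨d', hd', h⟩)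
          · exact Or.inl hq
          · exact Or.inr ⟨d', List.mem_cons_of_mem _ hd', h⟩
        · rintro (hq | ⟨d', hd', rfl, hlc⟩)
          · exact Or.inl hq
          · rcases List.mem_cons.mp hd' with rfl | hd'
            · exact absurd hlc.1 hng
            · exact Or.inr ⟨d', hd', rfl, hlc⟩

-- if every step-neighbor of the processed set lands in it or on the stack, reachability from a
-- processed cell factors through the stack
lemma pvClosure_transfer (board : List (List String)) (rows cols : Int) (color : String)
    (st : List (Int × Int)) (g : List (Int × Int))
    (hI : ∀ p ∈ g, ∀ q, pvStep board rows cols color p q → q ∈ g ∨ q ∈ st) :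
    ∀ a p, a ∈ g → pvReach board rows cols color a p →
      p ∈ g ∨ ∃ s ∈ st, pvReach board rows cols color s p := by
  intro a p ha h
  induction h with
  | refl => exact Or.inl ha
  | tail _ hstep ih =>
    rcases ih with hm | ⟨s, hs, hr⟩
    · rcases hI _ hm _ hstep with h1 | h1
      · exact Or.inl h1
      · exact Or.inr ⟨_, h1, Relation.ReflTransGen.refl⟩
    · exact Or.inr ⟨s, hs, hr.tail hstep⟩

lemma pvDfsA_nil (board : List (List String)) (rows cols : Int) (color : String)
    (fuel : Nat) (g l : PySem.Set (Int × Int)) :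
    pvDfsA board rows cols color (fuel + 1) [] g l = (g, l) := rfl

lemma pvDfsA_cons (board : List (List String)) (rows cols : Int) (color : String)
    (fuel : Nat) (c : Int × Int) (st : List (Int × Int)) (g l : PySem.Set (Int × Int)) :
    pvDfsA board rows cols color (fuel + 1) (c :: st) g l =
      if c ∈ g then pvDfsA board rows cols color fuel st g l
      else
        pvDfsA board rows cols color fuel
          (pvDeltas.foldl (pvScanA board rows cols color (PySem.Set.add g c) c) (st, l)).1
          (PySem.Set.add g c)
          (pvDeltas.foldl (pvScanA board rows cols color (PySem.Set.add g c) c) (st, l)).2 := rfl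

lemma pvDfsA_char (board : List (List String)) (rows cols : Int) (color : String) :
    ∀ (fuel : Nat) (st : List (Int × Int)) (g l : PySem.Set (Int × Int)),
    4 * pvFree rows cols g + st.length < fuel →
    (∀ p ∈ st, pvGood rows cols p ∧ pvCell board p.1 p.2 = color) →
    (∀ p ∈ g, ∀ q, pvStep board rows cols color p q → q ∈ g ∨ q ∈ st) →
    (∀ q, q ∈ l ↔ pvLibOf board rows cols color g q) →
    g.Nodup → l.Nodup →
    (∀ p, p ∈ (pvDfsA board rows cols color fuel st g l).1 ↔
        p ∈ g ∨ ∃ s ∈ st, pvReach board rows cols color s p) ∧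
    (∀ q, q ∈ (pvDfsA board rows cols color fuel st g l).2 ↔
        pvLibOf board rows cols color (pvDfsA board rows cols color fuel st g l).1 q) ∧
    (pvDfsA board rows cols color fuel st g l).1.Nodup ∧
    (pvDfsA board rows cols color fuel st g l).2.Nodup := by
  intro fuel
  induction fuel with
  | zero => intro st g l hb; omega
  | succ fuel ih =>
    intro st g l hb hst hI hl hgnd hlnd
    cases st with
    | nil =>
      rw [pvDfsA_nil]
      exact ⟨by simp, hl, hgnd, hlnd⟩
    | cons c st =>
      rw [pvDfsA_cons]
      by_cases hc : c ∈ g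
      · rw [if_pos hc]
        have hI' : ∀ p ∈ g, ∀ q, pvStep board rows cols color p q → q ∈ g ∨ q ∈ st := by
          intro p hp q hq
          rcases hI p hp q hq with h | h
          · exact Or.inl h
          · rcases List.mem_cons.mp h with rfl | h
            · exact Or.inl hc
            · exact Or.inr h
        obtain ⟨r1, r2, r3, r4⟩ := ih st g l (by simp only [List.length_cons] at hb; omega)
          (fun p hp => hst p (List.mem_cons_of_mem _ hp)) hI' hl hgnd hlnd
        refine ⟨?_, r2, r3, r4⟩
        intro p
        rw [r1 p]
        constructor
        · rintro (hp | ⟨s, hs, hr⟩)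
          · exact Or.inl hp
          · exact Or.inr ⟨s, List.mem_cons_of_mem _ hs, hr⟩
        · rintro (hp | ⟨s, hs, hr⟩)
          · exact Or.inl hp
          · rcases List.mem_cons.mp hs with rfl | hs
            · exact pvClosure_transfer board rows cols color st g hI' s p hc hr
            · exact Or.inr ⟨s, hs, hr⟩
      · rw [if_neg hc]
        obtain ⟨f1, f2, f3, f4⟩ :=
          pvScanA_fold board rows cols color (PySem.Set.add g c) c pvDeltas st l
        obtain ⟨hcg, hcc⟩ := hst c List.mem_cons_self
        have hfree := pvFree_add_lt rows cols g c hcg hc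
        have hlen4 : pvDeltas.length = 4 := rfl
        -- invariant transfer to the recursive call
        have hst' : ∀ p ∈ (pvDeltas.foldl (pvScanA board rows cols color
            (PySem.Set.add g c) c) (st, l)).1,
            pvGood rows cols p ∧ pvCell board p.1 p.2 = color := by
          intro p hp
          rcases (f1 p).mp hp with hp | ⟨d, _, rfl, hg2, hc2, _⟩
          · exact hst p (List.mem_cons_of_mem _ hp)
          · exact ⟨hg2, hc2⟩
        have hI' : ∀ p ∈ PySem.Set.add g c, ∀ q, pvStep board rows cols color p q →
            q ∈ PySem.Set.add g c ∨ q ∈ (pvDeltas.foldl (pvScanA board rows cols color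
              (PySem.Set.add g c) c) (st, l)).1 := by
          intro p hp q hq
          rcases (PySem.Set.mem_add _ _ _).mp hp with hp | rfl
          · rcases hI p hp q hq with h | h
            · exact Or.inl ((PySem.Set.mem_add _ _ _).mpr (Or.inl h))
            · rcases List.mem_cons.mp h with rfl | h
              · exact Or.inl ((PySem.Set.mem_add _ _ _).mpr (Or.inr rfl))
              · exact Or.inr ((f1 q).mpr (Or.inl h))
          · by_cases hqg : q ∈ PySem.Set.add g p
            · exact Or.inl hqg
            · obtain ⟨hqn, hqgood, hqcol⟩ := hq
              obtain ⟨d, hd, rfl⟩ := (mem_pvNbrsOf_iff p _).mp hqn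
              exact Or.inr ((f1 _).mpr (Or.inr ⟨d, hd, rfl, hqgood, hqcol, hqg⟩))
        have hl' : ∀ q, q ∈ (pvDeltas.foldl (pvScanA board rows cols color
            (PySem.Set.add g c) c) (st, l)).2 ↔
            pvLibOf board rows cols color (PySem.Set.add g c) q := by
          intro q
          rw [f2 q]
          constructor
          · rintro (hq | ⟨d, hd, rfl, hlc⟩)
            · obtain ⟨hlc, p, hp, hn⟩ := (hl q).mp hq
              exact ⟨hlc, p, (PySem.Set.mem_add _ _ _).mpr (Or.inl hp), hn⟩
            · refine ⟨hlc, c, (PySem.Set.mem_add _ _ _).mpr (Or.inr rfl), ?_⟩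
              exact (mem_pvNbrsOf_iff c _).mpr ⟨d, hd, rfl⟩
          · rintro ⟨hlc, p, hp, hn⟩
            rcases (PySem.Set.mem_add _ _ _).mp hp with hp | rfl
            · exact Or.inl ((hl q).mpr ⟨hlc, p, hp, hn⟩)
            · obtain ⟨d, hd, rfl⟩ := (mem_pvNbrsOf_iff p _).mp hn
              exact Or.inr ⟨d, hd, rfl, hlc⟩
        obtain ⟨r1, r2, r3, r4⟩ := ih _ _ _
          (by
            have h3 := f3
            simp only [List.length_cons] at hb
            rw [hlen4] at h3
            omega)
          hst' hI' hl' (PySem.Set.nodup_add g c hgnd) (f4 hlnd)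
        refine ⟨?_, r2, r3, r4⟩
        intro p
        rw [r1 p]
        constructor
        · rintro (hp | ⟨s, hs, hr⟩)
          · rcases (PySem.Set.mem_add _ _ _).mp hp with hp | rfl
            · exact Or.inl hp
            · exact Or.inr ⟨p, List.mem_cons_self, Relation.ReflTransGen.refl⟩
          · rcases (f1 s).mp hs with hs | ⟨d, hd, rfl, hg2, hc2, _⟩
            · exact Or.inr ⟨s, List.mem_cons_of_mem _ hs, hr⟩
            · refine Or.inr ⟨c, List.mem_cons_self, Relation.ReflTransGen.head ?_ hr⟩
              exact ⟨(mem_pvNbrsOf_iff c _).mpr ⟨d, hd, rfl⟩, hg2, hc2⟩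
        · rintro (hp | ⟨s, hs, hr⟩)
          · exact Or.inl ((PySem.Set.mem_add _ _ _).mpr (Or.inl hp))
          · rcases List.mem_cons.mp hs with rfl | hs
            · exact pvClosure_transfer board rows cols color _ _ hI' s p
                ((PySem.Set.mem_add _ _ _).mpr (Or.inr rfl)) hr
            · exact Or.inr ⟨s, (f1 s).mpr (Or.inl hs), hr⟩

-- ---- characterization of B's growth and saturation ----
lemma pvGrowStep_mem (board : List (List String)) (rows cols : Int) (color : String)
    (grown : PySem.Set (Int × Int)) (n q : Int × Int) :
    q ∈ pvGrowStep board rows cols color grown n ↔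
      q ∈ grown ∨ (q = n ∧ pvGood rows cols n ∧ pvCell board n.1 n.2 = color) := by
  unfold pvGrowStep
  by_cases h : (pvInB rows cols n.1 n.2 && (pvCell board n.1 n.2 == color)) = true
  · rw [if_pos h]
    rw [Bool.and_eq_true, beq_iff_eq, pvInB_iff] at h
    rw [PySem.Set.mem_add]
    constructor
    · rintro (hq | rfl)
      · exact Or.inl hq
      · exact Or.inr ⟨rfl, h.1, h.2⟩
    · rintro (hq | ⟨rfl, _, _⟩)
      · exact Or.inl hq
      · exact Or.inr rfl
  · rw [if_neg h]
    rw [Bool.and_eq_true, beq_iff_eq, pvInB_iff] at h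
    constructor
    · exact Or.inl
    · rintro (hq | ⟨rfl, hg, hcol⟩)
      · exact hq
      · exact absurd ⟨hg, hcol⟩ h
  
lemma pvGrowFold_inner (board : List (List String)) (rows cols : Int) (color : String) :
    ∀ (ds : List (Int × Int)) (grown : PySem.Set (Int × Int)) (q : Int × Int),
    q ∈ ds.foldl (pvGrowStep board rows cols color) grown ↔
      q ∈ grown ∨ ∃ n ∈ ds, q = n ∧ pvGood rows cols n ∧ pvCell board n.1 n.2 = color := by
  intro ds
  induction ds with
  | nil => intro grown q; simp
  | cons n ds ih =>
    intro grown q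
    rw [List.foldl_cons, ih]
    rw [pvGrowStep_mem]
    constructor
    · rintro ((hq | hq) | ⟨n', hn', h⟩)
      · exact Or.inl hq
      · exact Or.inr ⟨n, List.mem_cons_self, hq⟩
      · exact Or.inr ⟨n', List.mem_cons_of_mem _ hn', h⟩
    · rintro (hq | ⟨n', hn', h⟩)
      · exact Or.inl (Or.inl hq)
      · rcases List.mem_cons.mp hn' with rfl | hn'
        · exact Or.inl (Or.inr h)
        · exact Or.inr ⟨n', hn', h⟩

lemma pvGrowStep_nodup (board : List (List String)) (rows cols : Int) (color : String)
    (grown : PySem.Set (Int × Int)) (n : Int × Int) (h : grown.Nodup) :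
    (pvGrowStep board rows cols color grown n).Nodup := by
  unfold pvGrowStep
  split
  · exact PySem.Set.nodup_add grown n h
  · exact h

lemma pvGrowFold_inner_nodup (board : List (List String)) (rows cols : Int) (color : String) :
    ∀ (ds : List (Int × Int)) (grown : PySem.Set (Int × Int)), grown.Nodup →
    (ds.foldl (pvGrowStep board rows cols color) grown).Nodup := by
  intro ds
  induction ds with
  | nil => intro grown h; exact h
  | cons n ds ih =>
    intro grown h
    rw [List.foldl_cons]
    exact ih _ (pvGrowStep_nodup board rows cols color grown n h)

lemma pvGrowFold_outer (board : List (List String)) (rows cols : Int) (color : String) :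
    ∀ (xs : List (Int × Int)) (acc : PySem.Set (Int × Int)) (q : Int × Int),
    q ∈ xs.foldl (fun grown p =>
        (pvNbrsOf p).foldl (pvGrowStep board rows cols color) grown) acc ↔
      q ∈ acc ∨ ∃ p ∈ xs, pvStep board rows cols color p q := by
  intro xs
  induction xs with
  | nil => intro acc q; simp
  | cons p xs ih =>
    intro acc q
    rw [List.foldl_cons, ih]
    rw [pvGrowFold_inner]
    constructor
    · rintro ((hq | ⟨n, hn, rfl, hg, hc⟩) | ⟨p', hp', h⟩)
      · exact Or.inl hq
      · exact Or.inr ⟨p, List.mem_cons_self, hn, hg, hc⟩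
      · exact Or.inr ⟨p', List.mem_cons_of_mem _ hp', h⟩
    · rintro (hq | ⟨p', hp', hn, hg, hc⟩)
      · exact Or.inl (Or.inl hq)
      · rcases List.mem_cons.mp hp' with rfl | hp'
        · exact Or.inl (Or.inr ⟨q, hn, rfl, hg, hc⟩)
        · exact Or.inr ⟨p', hp', hn, hg, hc⟩

lemma pvGrow_mem (board : List (List String)) (rows cols : Int) (color : String)
    (comp : PySem.Set (Int × Int)) (q : Int × Int) :
    q ∈ pvGrow board rows cols color comp ↔
      q ∈ comp ∨ ∃ p ∈ comp, pvStep board rows cols color p q := by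
  unfold pvGrow
  rw [pvGrowFold_outer]
  rw [PySem.Set.mem_ofList]

lemma pvGrow_nodup (board : List (List String)) (rows cols : Int) (color : String)
    (comp : PySem.Set (Int × Int)) :
    (pvGrow board rows cols color comp).Nodup := by
  unfold pvGrow
  generalize hacc : (PySem.Set.ofList comp : PySem.Set (Int × Int)) = acc
  have hnd : acc.Nodup := hacc ▸ PySem.Set.nodup_ofList comp
  clear hacc
  induction comp generalizing acc with
  | nil => exact hnd
  | cons p xs ih =>
    rw [List.foldl_cons]
    exact ih _ (pvGrowFold_inner_nodup board rows cols color _ _ hnd)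

lemma pvListCard_le (rows cols : Int) (comp : List (Int × Int)) (hnd : comp.Nodup)
    (hgood : ∀ p ∈ comp, pvGood rows cols p) :
    comp.length ≤ rows.toNat * cols.toNat := by
  have h1 : comp.toFinset.card = comp.length := List.toFinset_card_of_nodup hnd
  have h2 : comp.toFinset.card ≤ (pvAllCells rows cols).card := by
    apply Finset.card_le_card_of_injOn (fun p => (p.1.toNat, p.2.toNat))
    · intro p hp
      simp only [Finset.mem_coe, List.mem_toFinset] at hp
      obtain ⟨a1, a2, a3, a4⟩ := hgood p hp
      simp only [Finset.mem_coe, mem_pvAllCells, pvAllCellsProp, Set.mem_setOf_eq, pvGood]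
      refine ⟨by omega, by omega, by omega, by omega⟩
    · intro p hp q hq hpq
      simp only [Finset.mem_coe, List.mem_toFinset] at hp hq
      obtain ⟨a1, _, a3, _⟩ := hgood p hp
      obtain ⟨b1, _, b3, _⟩ := hgood q hq
      have hx := congrArg Prod.fst hpq
      have hy := congrArg Prod.snd hpq
      simp only at hx hy
      exact Prod.ext_iff.mpr ⟨by omega, by omega⟩
  have h3 : (pvAllCells rows cols).card = rows.toNat * cols.toNat := by
    simp [pvAllCells]
  omega

lemma pvComponent_succ (board : List (List String)) (rows cols : Int) (color : String)
    (fuel : Nat) (comp : PySem.Set (Int × Int)) :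
    pvComponent board rows cols color (fuel + 1) comp =
      if (PySem.Set.len (pvGrow board rows cols color comp) == PySem.Set.len comp)
      then comp
      else pvComponent board rows cols color fuel (pvGrow board rows cols color comp) := rfl

lemma pvComponent_char (board : List (List String)) (rows cols : Int) (color : String)
    (start : Int × Int) :
    ∀ (fuel : Nat) (comp : PySem.Set (Int × Int)),
    comp.Nodup → (∀ p ∈ comp, pvGood rows cols p) →
    rows.toNat * cols.toNat < fuel + comp.length →
    (∀ p ∈ comp, pvReach board rows cols color start p) → start ∈ comp →
    (∀ p, p ∈ pvComponent board rows cols color fuel comp ↔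
        pvReach board rows cols color start p) ∧
    (pvComponent board rows cols color fuel comp).Nodup := by
  intro fuel
  induction fuel with
  | zero =>
    intro comp hnd hgood hbound
    have := pvListCard_le rows cols comp hnd hgood
    omega
  | succ fuel ih =>
    intro comp hnd hgood hbound hreach hstart
    have hgrownd := pvGrow_nodup board rows cols color comp
    have hsub : ∀ p ∈ comp, p ∈ pvGrow board rows cols color comp := by
      intro p hp
      exact (pvGrow_mem board rows cols color comp p).mpr (Or.inl hp)
    have hgg : ∀ p ∈ pvGrow board rows cols color comp, pvGood rows cols p := by
      intro p hp
      rcases (pvGrow_mem board rows cols color comp p).mp hp with hp | ⟨p', _, hstep⟩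
      · exact hgood p hp
      · exact hstep.2.1
    have hgr : ∀ p ∈ pvGrow board rows cols color comp,
        pvReach board rows cols color start p := by
      intro p hp
      rcases (pvGrow_mem board rows cols color comp p).mp hp with hp | ⟨p', hp', hstep⟩
      · exact hreach p hp
      · exact (hreach p' hp').tail hstep
    have hlen : comp.length ≤ (pvGrow board rows cols color comp).length := by
      have h1 : comp.toFinset ⊆ (pvGrow board rows cols color comp).toFinset := by
        intro p hp
        rw [List.mem_toFinset] at hp ⊢
        exact hsub p hp
      have := Finset.card_le_card h1
      rwa [List.toFinset_card_of_nodup hnd,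
        List.toFinset_card_of_nodup hgrownd] at this
    rw [pvComponent_succ]
    by_cases heq : (PySem.Set.len (pvGrow board rows cols color comp) ==
        PySem.Set.len comp) = true
    · rw [if_pos heq]
      -- fixpoint: grown and comp have the same members
      have hleneq : (pvGrow board rows cols color comp).length = comp.length := by
        have := beq_iff_eq.mp heq
        simp only [PySem.Set.len] at this
        omega
      have hfeq : comp.toFinset = (pvGrow board rows cols color comp).toFinset := by
        apply Finset.eq_of_subset_of_card_le
        · intro p hp
          rw [List.mem_toFinset] at hp ⊢
          exact hsub p hp
        · rw [List.toFinset_card_of_nodup hnd, List.toFinset_card_of_nodup hgrownd]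
          omega
      have hmemeq : ∀ p, p ∈ pvGrow board rows cols color comp ↔ p ∈ comp := by
        intro p
        rw [← List.mem_toFinset, ← hfeq, List.mem_toFinset]
      refine ⟨?_, hnd⟩
      intro p
      constructor
      · exact hreach p
      · intro hr
        induction hr with
        | refl => exact hstart
        | tail _ hstep ihh =>
          exact (hmemeq _).mp ((pvGrow_mem board rows cols color comp _).mpr
            (Or.inr ⟨_, ihh, hstep⟩))
    · rw [if_neg heq]
      have hneq : (pvGrow board rows cols color comp).length ≠ comp.length := by
        intro hcon
        apply heq
        rw [beq_iff_eq]
        simp only [PySem.Set.len]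
        omega
      exact ih (pvGrow board rows cols color comp) hgrownd hgg (by omega) hgr
        (hsub start hstart)

-- ---- characterization of B's liberty pass ----
lemma pvLibStep_mem (board : List (List String)) (rows cols : Int) (cell : String)
    (libs : PySem.Set (Int × Int)) (n q : Int × Int) :
    q ∈ pvLibStep board rows cols cell libs n ↔
      q ∈ libs ∨ (q = n ∧ pvLibCond board rows cols cell n) := by
  unfold pvLibStep
  by_cases h : (pvInB rows cols n.1 n.2 && !(pvCell board n.1 n.2 == cell) &&
      (pvCell board n.1 n.2 == "B" || pvCell board n.1 n.2 == "W")) = true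
  · rw [if_pos h]
    simp only [Bool.and_eq_true, Bool.not_eq_true', beq_eq_false_iff_ne,
      Bool.or_eq_true, beq_iff_eq, pvInB_iff] at h
    rw [PySem.Set.mem_add]
    constructor
    · rintro (hq | rfl)
      · exact Or.inl hq
      · exact Or.inr ⟨rfl, h.1.1, h.1.2, h.2.symm.imp id id⟩
    · rintro (hq | ⟨rfl, _⟩)
      · exact Or.inl hq
      · exact Or.inr rfl
  · rw [if_neg h]
    simp only [Bool.and_eq_true, Bool.not_eq_true', beq_eq_false_iff_ne,
      Bool.or_eq_true, beq_iff_eq] at h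
    constructor
    · exact Or.inl
    · rintro (hq | ⟨rfl, hg, hne, hwb⟩)
      · exact hq
      · rw [pvInB_iff] at h
        exact absurd ⟨⟨hg, hne⟩, hwb.symm.imp id id⟩ h

lemma pvLibFold_inner (board : List (List String)) (rows cols : Int) (cell : String) :
    ∀ (ds : List (Int × Int)) (libs : PySem.Set (Int × Int)) (q : Int × Int),
    q ∈ ds.foldl (pvLibStep board rows cols cell) libs ↔
      q ∈ libs ∨ (q ∈ ds ∧ pvLibCond board rows cols cell q) := by
  intro ds
  induction ds with
  | nil => intro libs q; simp
  | cons n ds ih =>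
    intro libs q
    rw [List.foldl_cons, ih]
    rw [pvLibStep_mem]
    constructor
    · rintro ((hq | ⟨rfl, h⟩) | ⟨hq, h⟩)
      · exact Or.inl hq
      · exact Or.inr ⟨List.mem_cons_self, h⟩
      · exact Or.inr ⟨List.mem_cons_of_mem _ hq, h⟩
    · rintro (hq | ⟨hq, h⟩)
      · exact Or.inl (Or.inl hq)
      · rcases List.mem_cons.mp hq with rfl | hq
        · exact Or.inl (Or.inr ⟨rfl, h⟩)
        · exact Or.inr ⟨hq, h⟩

lemma pvLibFold_inner_nodup (board : List (List String)) (rows cols : Int) (cell : String) :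
    ∀ (ds : List (Int × Int)) (libs : PySem.Set (Int × Int)), libs.Nodup →
    (ds.foldl (pvLibStep board rows cols cell) libs).Nodup := by
  intro ds
  induction ds with
  | nil => intro libs h; exact h
  | cons n ds ih =>
    intro libs h
    rw [List.foldl_cons]
    apply ih
    unfold pvLibStep
    split
    · exact PySem.Set.nodup_add libs n h
    · exact h

lemma pvLibsB_mem (board : List (List String)) (rows cols : Int) (cell : String)
    (comp : PySem.Set (Int × Int)) (q : Int × Int) :
    q ∈ pvLibsB board rows cols cell comp ↔
      pvLibOf board rows cols cell comp q := by
  unfold pvLibsB pvLibOf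
  have houter : ∀ (xs : List (Int × Int)) (acc : PySem.Set (Int × Int)),
      q ∈ xs.foldl (fun libs p =>
          (pvNbrsOf p).foldl (pvLibStep board rows cols cell) libs) acc ↔
        q ∈ acc ∨ ((∃ p ∈ xs, q ∈ pvNbrsOf p) ∧ pvLibCond board rows cols cell q) := by
    intro xs
    induction xs with
    | nil => intro acc; simp
    | cons p xs ih =>
      intro acc
      rw [List.foldl_cons, ih, pvLibFold_inner]
      constructor
      · rintro ((hq | ⟨hn, h⟩) | ⟨⟨p', hp', hn⟩, h⟩)
        · exact Or.inl hq
        · exact Or.inr ⟨⟨p, List.mem_cons_self, hn⟩, h⟩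
        · exact Or.inr ⟨⟨p', List.mem_cons_of_mem _ hp', hn⟩, h⟩
      · rintro (hq | ⟨⟨p', hp', hn⟩, h⟩)
        · exact Or.inl (Or.inl hq)
        · rcases List.mem_cons.mp hp' with rfl | hp'
          · exact Or.inl (Or.inr ⟨hn, h⟩)
          · exact Or.inr ⟨⟨p', hp', hn⟩, h⟩
  rw [houter comp PySem.Set.empty]
  simp only [PySem.Set.empty]
  constructor
  · rintro (hq | ⟨⟨p, hp, hn⟩, h⟩)
    · simp at hq
    · exact ⟨h, p, hp, hn⟩
  · rintro ⟨h, p, hp, hn⟩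
    exact Or.inr ⟨⟨p, hp, hn⟩, h⟩

lemma pvLibsB_nodup (board : List (List String)) (rows cols : Int) (cell : String)
    (comp : PySem.Set (Int × Int)) :
    (pvLibsB board rows cols cell comp).Nodup := by
  unfold pvLibsB
  generalize hacc : (PySem.Set.empty : PySem.Set (Int × Int)) = acc
  have hnd : acc.Nodup := by rw [← hacc]; exact List.nodup_nil
  clear hacc
  induction comp generalizing acc with
  | nil => exact hnd
  | cons p xs ih =>
    rw [List.foldl_cons]
    exact ih _ (pvLibFold_inner_nodup board rows cols cell _ _ hnd)

-- ---- per-start agreement of the two group computations ----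
lemma pvGroups_agree (board : List (List String)) (rows cols : Int) (color : String)
    (start : Int × Int) (fa fb : Nat)
    (hg : pvGood rows cols start) (hc : pvCell board start.1 start.2 = color)
    (hfa : 4 * (rows.toNat * cols.toNat) + 1 < fa)
    (hfb : rows.toNat * cols.toNat < fb + 1) :
    (∀ p, p ∈ (pvDfsA board rows cols color fa [start] PySem.Set.empty PySem.Set.empty).1 ↔
        p ∈ pvComponent board rows cols color fb (PySem.Set.add PySem.Set.empty start)) ∧
    (pvDfsA board rows cols color fa [start] PySem.Set.empty PySem.Set.empty).1.length =
      (pvComponent board rows cols color fb (PySem.Set.add PySem.Set.empty start)).length ∧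
    (∀ q, q ∈ (pvDfsA board rows cols color fa [start] PySem.Set.empty PySem.Set.empty).2 ↔
        q ∈ pvLibsB board rows cols color
          (pvComponent board rows cols color fb (PySem.Set.add PySem.Set.empty start))) ∧
    (pvDfsA board rows cols color fa [start] PySem.Set.empty PySem.Set.empty).2.length =
      (pvLibsB board rows cols color
          (pvComponent board rows cols color fb (PySem.Set.add PySem.Set.empty start))).length := by
  have hinit : (PySem.Set.add PySem.Set.empty start : PySem.Set (Int × Int)) = [start] := rfl
  obtain ⟨a1, a2, a3, a4⟩ := pvDfsA_char board rows cols color fa [start]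
    PySem.Set.empty PySem.Set.empty
    (by
      have : pvFree rows cols (PySem.Set.empty : PySem.Set (Int × Int)) =
          rows.toNat * cols.toNat := pvFree_empty rows cols
      simp only [List.length_cons, List.length_nil]
      omega)
    (by
      intro p hp
      rcases List.mem_cons.mp hp with rfl | hp
      · exact ⟨hg, hc⟩
      · simp at hp)
    (by intro p hp; simp [PySem.Set.empty] at hp)
    (by
      intro q
      simp only [PySem.Set.empty, List.not_mem_nil, false_iff, pvLibOf]
      rintro ⟨_, p, hp, _⟩
      simp at hp)
    List.nodup_nil List.nodup_nil
  rw [hinit]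
  obtain ⟨b1, b2⟩ := pvComponent_char board rows cols color start fb [start]
    (List.nodup_singleton start)
    (by
      intro p hp
      rcases List.mem_cons.mp hp with rfl | hp
      · exact hg
      · simp at hp)
    (by simp only [List.length_cons, List.length_nil]; omega)
    (by
      intro p hp
      rcases List.mem_cons.mp hp with rfl | hp
      · exact Relation.ReflTransGen.refl
      · simp at hp)
    List.mem_cons_self
  have hmem : ∀ p, p ∈ (pvDfsA board rows cols color fa [start]
      PySem.Set.empty PySem.Set.empty).1 ↔
      p ∈ pvComponent board rows cols color fb [start] := by
    intro p
    rw [a1 p, b1 p]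
    simp only [PySem.Set.empty, List.not_mem_nil, false_or]
    constructor
    · rintro ⟨s, hs, hr⟩
      rcases List.mem_cons.mp hs with rfl | hs
      · exact hr
      · simp at hs
    · intro hr
      exact ⟨start, List.mem_cons_self, hr⟩
  have hlen : (pvDfsA board rows cols color fa [start]
      PySem.Set.empty PySem.Set.empty).1.length =
      (pvComponent board rows cols color fb [start]).length :=
    ((List.perm_ext_iff_of_nodup a3 b2).mpr hmem).length_eq
  have hlib : ∀ q, q ∈ (pvDfsA board rows cols color fa [start]
      PySem.Set.empty PySem.Set.empty).2 ↔
      q ∈ pvLibsB board rows cols color (pvComponent board rows cols color fb [start]) := by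
    intro q
    rw [a2 q, pvLibsB_mem]
    unfold pvLibOf
    constructor
    · rintro ⟨hcond, p, hp, hn⟩
      exact ⟨hcond, p, (hmem p).mp hp, hn⟩
    · rintro ⟨hcond, p, hp, hn⟩
      exact ⟨hcond, p, (hmem p).mpr hp, hn⟩
  refine ⟨hmem, hlen, hlib, ?_⟩
  exact ((List.perm_ext_iff_of_nodup a4
    (pvLibsB_nodup board rows cols color _)).mpr hlib).length_eq

-- ---- the "in \"BW\"" quirk, and cells under Pre_ ----
lemma pvInfix_pair {l : List Char} {a b : Char} (h : l <:+: [a, b]) :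
    l = [] ∨ l = [a] ∨ l = [b] ∨ l = [a, b] := by
  obtain ⟨s, t, hst⟩ := h
  cases s with
  | nil =>
    cases l with
    | nil => exact Or.inl rfl
    | cons x l' =>
      simp only [List.nil_append, List.cons_append, List.cons.injEq] at hst
      obtain ⟨rfl, hst⟩ := hst
      cases l' with
      | nil => exact Or.inr (Or.inl rfl)
      | cons y l'' =>
        simp only [List.cons_append, List.cons.injEq] at hst
        obtain ⟨rfl, hst⟩ := hst
        have hnil : l'' = [] := by
          cases l'' with
          | nil => rfl
          | cons z l3 => simp at hst
        subst hnil
        exact Or.inr (Or.inr (Or.inr rfl))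
  | cons x s' =>
    simp only [List.cons_append, List.cons.injEq] at hst
    obtain ⟨rfl, hst⟩ := hst
    cases s' with
    | nil =>
      cases l with
      | nil => exact Or.inl rfl
      | cons y l' =>
        simp only [List.nil_append, List.cons_append, List.cons.injEq] at hst
        obtain ⟨rfl, hst⟩ := hst
        have hnil : l' = [] := by
          cases l' with
          | nil => rfl
          | cons z l3 => simp at hst
        subst hnil
        exact Or.inr (Or.inr (Or.inl rfl))
    | cons y s'' =>
      simp only [List.cons_append, List.cons.injEq] at hst
      obtain ⟨rfl, hst⟩ := hst
      have hnil : l = [] := by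
        cases s'' <;> cases l <;> simp_all
      exact Or.inl hnil

lemma pvIsIn_BW (t : String) :
    PySem.Str.isIn t "BW" = true ↔ t = "" ∨ t = "B" ∨ t = "W" ∨ t = "BW" := by
  rw [PySem.Str.isIn_iff_infix]
  constructor
  · intro h
    have hc := pvInfix_pair (a := 'B') (b := 'W') (by simpa using h)
    rcases hc with h1 | h1 | h1 | h1
    · exact Or.inl (String.toList_inj.mp (by simpa using h1))
    · exact Or.inr (Or.inl (String.toList_inj.mp (by simpa using h1)))
    · exact Or.inr (Or.inr (Or.inl (String.toList_inj.mp (by simpa using h1))))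
    · exact Or.inr (Or.inr (Or.inr (String.toList_inj.mp (by simpa using h1))))
  · rintro (rfl | rfl | rfl | rfl) <;> decide

lemma pvPre_cell (board : List (List String)) (r c : Int)
    (hpre : Pre_stone_scoring board)
    (hr : 0 ≤ r ∧ r < (board.length : Int))
    (hc : 0 ≤ c ∧ c < ((board.headD []).length : Int)) :
    pvCell board r c ≠ "" ∧ pvCell board r c ≠ "BW" := by
  obtain ⟨hne, hrow⟩ := hpre
  have hrl : r.toNat < board.length := by omega
  have hget1 : PySem.List.pyGet? board r = some board[r.toNat] := by
    rw [PySem.List.pyGet?_of_nonneg _ hr.1]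
    rw [List.getElem?_eq_getElem hrl]
  have hmem : board[r.toNat] ∈ board := List.getElem_mem hrl
  obtain ⟨hlen, hcells⟩ := hrow _ hmem
  have hcl : c.toNat < (board.headD []).length := by omega
  have hcl2 : c.toNat < board[r.toNat].length := lt_of_lt_of_le hcl hlen
  have hget2 : PySem.List.pyGet? board[r.toNat] c = some board[r.toNat][c.toNat] := by
    rw [PySem.List.pyGet?_of_nonneg _ hc.1]
    rw [List.getElem?_eq_getElem hcl2]
  have hcell : pvCell board r c = board[r.toNat][c.toNat] := by
    simp [pvCell, hget1, hget2]
  rw [hcell]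
  apply hcells
  have htk : (board[r.toNat].take (board.headD []).length)[c.toNat]'(by
      rw [List.length_take]; omega) = board[r.toNat][c.toNat] :=
    List.getElem_take
  rw [← htk]
  exact List.getElem_mem _

-- ---- relating the two outer loops ----
def pvRel (stA : PySem.Set (Int × Int) × PySem.Dict String Int)
    (stB : PySem.Set (Int × Int) × (Int × Int)) : Prop :=
  (∀ p, p ∈ stA.1 ↔ p ∈ stB.1) ∧ stA.2.getD "B" 0 = stB.2.1 ∧ stA.2.getD "W" 0 = stB.2.2

lemma pvFoldRel {α β γ : Type} (R : α → β → Prop) (fA : α → γ → α) (fB : β → γ → β)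
    (l : List γ) (h : ∀ x ∈ l, ∀ a b, R a b → R (fA a x) (fB b x)) :
    ∀ a b, R a b → R (l.foldl fA a) (l.foldl fB b) := by
  induction l with
  | nil => intro a b hab; exact hab
  | cons x xs ih =>
    intro a b hab
    exact ih (fun y hy => h y (List.mem_cons_of_mem _ hy)) _ _ (h x List.mem_cons_self _ _ hab)

lemma pvCellStep_rel (board : List (List String)) (r c : Int)
    (hpre : Pre_stone_scoring board)
    (hr : 0 ≤ r ∧ r < (board.length : Int))
    (hc : 0 ≤ c ∧ c < ((board.headD []).length : Int))
    (stA : PySem.Set (Int × Int) × PySem.Dict String Int)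
    (stB : PySem.Set (Int × Int) × (Int × Int)) (hrel : pvRel stA stB) :
    pvRel (pvCellStepA board (board.length : Int) ((board.headD []).length : Int)
            (4 * (board.length * (board.headD []).length) + 2) r stA c)
          (pvCellStepB board (board.length : Int) ((board.headD []).length : Int)
            (board.length * (board.headD []).length + 1) r stB c) := by
  obtain ⟨hv, hB, hW⟩ := hrel
  obtain ⟨hne, hnbw⟩ := pvPre_cell board r c hpre hr hc
  have hcont : PySem.Set.contains stA.1 (r, c) = PySem.Set.contains stB.1 (r, c) := by
    by_cases hm : (r, c) ∈ stA.1
    · rw [(PySem.Set.contains_iff _ _).mpr hm, (PySem.Set.contains_iff _ _).mpr ((hv _).mp hm)]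
    · have hm' : (r, c) ∉ stB.1 := fun hcon => hm ((hv _).mpr hcon)
      rw [Bool.eq_false_iff.mpr (fun hcon => hm ((PySem.Set.contains_iff _ _).mp hcon)),
        Bool.eq_false_iff.mpr (fun hcon => hm' ((PySem.Set.contains_iff _ _).mp hcon))]
  have hstone : PySem.Str.isIn (pvCell board r c) "BW" =
      (pvCell board r c == "B" || pvCell board r c == "W") := by
    by_cases hs : pvCell board r c = "B" ∨ pvCell board r c = "W"
    · have h1 : PySem.Str.isIn (pvCell board r c) "BW" = true := by
        rw [pvIsIn_BW]
        tauto
      rw [h1]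
      rcases hs with h | h <;> simp [h]
    · have h1 : PySem.Str.isIn (pvCell board r c) "BW" = false := by
        rw [Bool.eq_false_iff]
        intro hcon
        rcases (pvIsIn_BW _).mp hcon with h | h | h | h
        · exact hne h
        · exact hs (Or.inl h)
        · exact hs (Or.inr h)
        · exact hnbw h
      rw [h1]
      symm
      rw [Bool.or_eq_false_iff]
      constructor <;> rw [beq_eq_false_iff_ne]
      · exact fun h => hs (Or.inl h)
      · exact fun h => hs (Or.inr h)
  unfold pvCellStepA pvCellStepB
  rw [hstone, hcont]
  by_cases hcond : ((pvCell board r c == "B" || pvCell board r c == "W") &&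
      !PySem.Set.contains stB.1 (r, c)) = true
  · rw [if_pos hcond, if_pos hcond]
    obtain ⟨hbw, _⟩ := Bool.and_eq_true_iff.mp hcond
    have hbw' : pvCell board r c = "B" ∨ pvCell board r c = "W" := by
      rcases Bool.or_eq_true_iff.mp hbw with h | h
      · exact Or.inl (beq_iff_eq.mp h)
      · exact Or.inr (beq_iff_eq.mp h)
    have hgood : pvGood (board.length : Int) ((board.headD []).length : Int) (r, c) :=
      ⟨hr.1, hr.2, hc.1, hc.2⟩
    have htn : ((board.length : Int)).toNat * (((board.headD []).length : Int)).toNat =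
        board.length * (board.headD []).length := by simp
    obtain ⟨m1, m2, m3, m4⟩ := pvGroups_agree board (board.length : Int)
      ((board.headD []).length : Int) (pvCell board r c) (r, c)
      (4 * (board.length * (board.headD []).length) + 2)
      (board.length * (board.headD []).length + 1)
      hgood rfl (by omega) (by omega)
    refine ⟨?_, ?_, ?_⟩
    · intro p
      simp only [PySem.Set.mem_update]
      rw [hv p, m1 p]
    · simp only [PySem.List.len_eq, m2, m4]
      rcases hbw' with hcol | hcol <;> rw [hcol] <;>
        simp [PySem.Dict.getD_insert, hB]
    · simp only [PySem.List.len_eq, m2, m4]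
      rcases hbw' with hcol | hcol <;> rw [hcol] <;>
        simp [PySem.Dict.getD_insert, hW]
  · rw [if_neg hcond, if_neg hcond]
    exact ⟨hv, hB, hW⟩

-- ===== VERDICT (by name: the statement is the Claim_ definition above) =====
theorem stone_scoring_spec : Claim_equal_stone_scoring := by
  intro board _ hpre
  unfold Spec_stone_scoring stone_scoring stone_scoring_alt
  simp only [PySem.List.len_eq]
  have hinit : pvRel ((PySem.Set.empty : PySem.Set (Int × Int)),
      (PySem.Dict.ofList [("B", 0), ("W", 0)] : PySem.Dict String Int))
      ((PySem.Set.empty : PySem.Set (Int × Int)), ((0 : Int), (0 : Int))) := by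
    refine ⟨fun p => Iff.rfl, by decide, by decide⟩
  have hrel := pvFoldRel pvRel
    (fun st r => (PySem.List.pyRange 0 ((board.headD []).length : Int) 1).foldl
      (pvCellStepA board (board.length : Int) ((board.headD []).length : Int)
        (4 * (board.length * (board.headD []).length) + 2) r) st)
    (fun st r => (PySem.List.pyRange 0 ((board.headD []).length : Int) 1).foldl
      (pvCellStepB board (board.length : Int) ((board.headD []).length : Int)
        (board.length * (board.headD []).length + 1) r) st)
    (PySem.List.pyRange 0 (board.length : Int) 1)
    (fun r hrmem stA stB h => by
      have hrb : 0 ≤ r ∧ r < (board.length : Int) := by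
        have := PySem.List.mem_pyRange_one.mp hrmem
        omega
      exact pvFoldRel pvRel _ _ _
        (fun c hcmem stA' stB' h' => by
          have hcb : 0 ≤ c ∧ c < ((board.headD []).length : Int) := by
            have := PySem.List.mem_pyRange_one.mp hcmem
            omega
          exact pvCellStep_rel board r c hpre hrb hcb stA' stB' h')
        stA stB h)
    _ _ hinit
  obtain ⟨hv, hB, hW⟩ := hrel
  simp only [hB, hW]
  rfl
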